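-- pv_equiv track=rewrite | github.com/blzzua/codewars | 6-kyu/counting_rectangle_triangles.py | check_if_triangle_rect
-- ===== SOURCE A (Python) =====
-- from itertools import combinations
--
-- def check_if_triangle_rect(tri):
--     a = tri[0]
--     b = tri[1]
--     c = tri[2]
--     ab = (a[0]-b[0], a[1]-b[1])
--     ac = (a[0]-c[0], a[1]-c[1])
--     bc = (b[0]-c[0], b[1]-c[1])
--     for p1, p2 in combinations((ab,ac,bc),2):
--         if abs(p1[0]*p2[0] + p1[1]*p2[1]) == 0:
--             return True
--     return False
-- ===== SOURCE B (Python) =====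
-- def check_if_triangle_rect(tri):
--     (ax, ay), (bx, by), (cx, cy) = tri[0], tri[1], tri[2]
--     s_ab = (ax - bx) ** 2 + (ay - by) ** 2
--     s_ac = (ax - cx) ** 2 + (ay - cy) ** 2
--     s_bc = (bx - cx) ** 2 + (by - cy) ** 2
--     return s_ab == s_ac + s_bc or s_ac == s_ab + s_bc or s_bc == s_ab + s_ac
-- ===== Notes on version B (the rewrite author's own statement) =====
-- stated objective: simpler
-- what changed: replaces edge vectors and three pairwise dot products with squared side lengths and the Pythagorean sum test
import Mathlib
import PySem

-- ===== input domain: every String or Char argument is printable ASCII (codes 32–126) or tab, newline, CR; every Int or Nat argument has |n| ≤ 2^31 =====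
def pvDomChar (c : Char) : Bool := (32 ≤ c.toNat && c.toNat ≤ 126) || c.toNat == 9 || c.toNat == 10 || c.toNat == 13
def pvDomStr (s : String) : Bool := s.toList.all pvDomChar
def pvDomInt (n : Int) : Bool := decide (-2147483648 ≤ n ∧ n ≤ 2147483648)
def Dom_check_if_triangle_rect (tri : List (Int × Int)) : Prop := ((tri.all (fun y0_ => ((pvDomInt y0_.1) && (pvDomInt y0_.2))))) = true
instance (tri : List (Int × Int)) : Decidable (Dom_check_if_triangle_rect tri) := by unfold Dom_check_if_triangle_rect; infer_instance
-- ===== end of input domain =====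

-- B replaces edge vectors and pairwise dot products with squared side lengths and the
-- Pythagorean sum test (simpler); equal on all lists with at least 3 points (else both raise).

-- ===== PORT A =====
-- A indexes tri[0], tri[1], tri[2]; the combinations loop over the 3 vector pairs is
-- unrolled into the same three dot-product tests in the same order.
def check_if_triangle_rect (tri : List (Int × Int)) : Bool :=
  match PySem.List.pyGet? tri 0, PySem.List.pyGet? tri 1, PySem.List.pyGet? tri 2 with
  | some a, some b, some c =>
    let ab := (a.1 - b.1, a.2 - b.2)
    let ac := (a.1 - c.1, a.2 - c.2)
    let bc := (b.1 - c.1, b.2 - c.2)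
    if |ab.1 * ac.1 + ab.2 * ac.2| = 0 then true
    else if |ab.1 * bc.1 + ab.2 * bc.2| = 0 then true
    else if |ac.1 * bc.1 + ac.2 * bc.2| = 0 then true
    else false
  | _, _, _ => false  -- IndexError in Python; excluded by Pre_

-- ===== PORT B =====
def check_if_triangle_rect_alt (tri : List (Int × Int)) : Bool :=
  (((PySem.List.pyGet? tri 0).bind fun a =>
    (PySem.List.pyGet? tri 1).bind fun b =>
    (PySem.List.pyGet? tri 2).map fun c =>
      let s_ab := (a.1 - b.1) ^ 2 + (a.2 - b.2) ^ 2
      let s_ac := (a.1 - c.1) ^ 2 + (a.2 - c.2) ^ 2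
      let s_bc := (b.1 - c.1) ^ 2 + (b.2 - c.2) ^ 2
      decide (s_ab = s_ac + s_bc) || decide (s_ac = s_ab + s_bc) || decide (s_bc = s_ab + s_ac)).getD
    false)  -- none = IndexError in Python; excluded by Pre_

-- ===== PRECONDITION & SPEC =====
-- A raises IndexError when tri has fewer than 3 points (so does B).
def Pre_check_if_triangle_rect (tri : List (Int × Int)) : Prop := 3 ≤ tri.length
instance (tri : List (Int × Int)) : Decidable (Pre_check_if_triangle_rect tri) := by unfold Pre_check_if_triangle_rect; infer_instance
def pvWitness_check_if_triangle_rect : (List (Int × Int)) := [(0, 0), (3, 0), (0, 4)]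

def Spec_check_if_triangle_rect (tri : List (Int × Int)) (out : Bool) : Prop := out = check_if_triangle_rect_alt tri
instance (tri : List (Int × Int)) (out : Bool) : Decidable (Spec_check_if_triangle_rect tri out) := by unfold Spec_check_if_triangle_rect; infer_instance

-- ===== CLAIM =====
def Claim_equal_check_if_triangle_rect : Prop := ∀ (tri : List (Int × Int)), Dom_check_if_triangle_rect tri → Pre_check_if_triangle_rect tri → Spec_check_if_triangle_rect tri (check_if_triangle_rect tri)

-- ===== LEMMAS AND PROOFS =====

-- ===== VERDICT =====
theorem check_if_triangle_rect_spec : Claim_equal_check_if_triangle_rect := by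
  intro tri _ hpre
  match tri, hpre with
  | (ax, ay) :: (bx, by') :: (cx, cy) :: rest, _ =>
    show check_if_triangle_rect _ = check_if_triangle_rect_alt _
    simp only [check_if_triangle_rect, check_if_triangle_rect_alt,
      PySem.List.pyGet?, PySem.List.pyIdx?]
    norm_num [List.length_cons]
    rw [if_pos (show (0:ℤ) ≤ (rest.length : ℤ) + 1 + 1 by positivity),
        if_pos (show (0:ℤ) ≤ (rest.length : ℤ) + 1 by positivity),
        if_pos (show (2:ℤ) ≤ (rest.length : ℤ) + 1 + 1 by omega)]
    simp only [show Int.toNat 2 = 2 from rfl, Option.bind_some, Option.map_some,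
      Option.getD_some, List.getElem?_cons_zero, List.getElem?_cons_succ]
    rw [Bool.eq_iff_iff]
    simp only [Bool.or_eq_true, decide_eq_true_eq]
    have e1 : (ax - bx) * (ax - cx) + (ay - by') * (ay - cy) = 0 ↔
        (bx - cx) ^ 2 + (by' - cy) ^ 2 = (ax - bx) ^ 2 + (ay - by') ^ 2 + ((ax - cx) ^ 2 + (ay - cy) ^ 2) := by
      constructor <;> intro h
      · linear_combination (-2 : ℤ) * h
      · have h2 : 2 * ((ax - bx) * (ax - cx) + (ay - by') * (ay - cy)) = 0 := by
          linear_combination -h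
        linarith
    have e2 : (ax - bx) * (bx - cx) + (ay - by') * (by' - cy) = 0 ↔
        (ax - cx) ^ 2 + (ay - cy) ^ 2 = (ax - bx) ^ 2 + (ay - by') ^ 2 + ((bx - cx) ^ 2 + (by' - cy) ^ 2) := by
      constructor <;> intro h
      · linear_combination (2 : ℤ) * h
      · have h2 : 2 * ((ax - bx) * (bx - cx) + (ay - by') * (by' - cy)) = 0 := by
          linear_combination h
        linarith
    have e3 : (ax - cx) * (bx - cx) + (ay - cy) * (by' - cy) = 0 ↔
        (ax - bx) ^ 2 + (ay - by') ^ 2 = (ax - cx) ^ 2 + (ay - cy) ^ 2 + ((bx - cx) ^ 2 + (by' - cy) ^ 2) := by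
      constructor <;> intro h
      · linear_combination (-2 : ℤ) * h
      · have h2 : 2 * ((ax - cx) * (bx - cx) + (ay - cy) * (by' - cy)) = 0 := by
          linear_combination -h
        linarith
    rw [e1, e2, e3]
    tauto
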